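-- pv_equiv track=rewrite | github.com/camelcars-ucl/Algorithms | word_boggle.py | set_paramaters
-- ===== SOURCE A (Python) =====
-- def set_paramaters(dictionary):
--     parameters = {}  # stores character with its corresponding max length
--     for word in dictionary:
--         if word[0] not in parameters:
--             parameters[word[0]] = len(word)
--         else:
--             if len(word) > parameters[word[0]]:
--                 parameters[word[0]] = len(word)
--     return parameters
-- ===== SOURCE B (Python) =====
-- def set_paramaters(dictionary):
--     # two passes: group word lengths by first character, then reduce each group with max
--     groups = {}
--     for word in dictionary:
--         groups.setdefault(word[0], []).append(len(word))
--     return {c: max(lengths) for c, lengths in groups.items()}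
-- ===== Notes on version B (the rewrite author's own statement) =====
-- stated objective: alternative
-- what changed: Replaces the single-pass running-max update with a build-index-then-reduce shape: one pass groups word lengths by first character via setdefault, a second pass takes max per group.
import Mathlib
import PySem

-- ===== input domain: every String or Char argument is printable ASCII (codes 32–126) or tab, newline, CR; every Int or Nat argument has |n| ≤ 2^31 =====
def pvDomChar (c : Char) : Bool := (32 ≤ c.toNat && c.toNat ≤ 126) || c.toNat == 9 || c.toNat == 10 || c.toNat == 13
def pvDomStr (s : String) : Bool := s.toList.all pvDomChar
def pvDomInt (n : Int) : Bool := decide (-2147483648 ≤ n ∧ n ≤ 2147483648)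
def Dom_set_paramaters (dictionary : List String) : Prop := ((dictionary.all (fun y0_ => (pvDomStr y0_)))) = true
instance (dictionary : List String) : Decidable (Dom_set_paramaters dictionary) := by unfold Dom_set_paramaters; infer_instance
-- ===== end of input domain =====

-- B replaces A's single-pass running-max with a two-pass group-then-reduce shape (same cost, different decomposition).


-- ===== PORT A =====
-- word[0] as a one-character string; 'none' is Python's IndexError on an empty word, excluded by Pre_
def pvFirst (word : String) : String :=
  match PySem.Str.pyGet? word 0 with
  | some c => String.ofList [c]
  | none => ""

def set_paramaters (dictionary : List String) : List (String × Int) :=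
  (dictionary.foldl (fun parameters word =>
    if parameters.contains (pvFirst word) = false then
      parameters.insert (pvFirst word) (PySem.Str.len word)
    else
      if PySem.Str.len word > parameters.getD (pvFirst word) 0 then
        parameters.insert (pvFirst word) (PySem.Str.len word)
      else parameters)
    PySem.Dict.empty).items

-- ===== PORT B =====
def set_paramaters_alt (dictionary : List String) : List (String × Int) :=
  let groups := dictionary.foldl
    (fun g word => g.modify (pvFirst word) [] (· ++ [PySem.Str.len word]))
    PySem.Dict.empty
  groups.items.map (fun p => (p.1, (PySem.List.max? p.2 (fun y => y)).getD 0))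

-- ===== PRECONDITION & SPEC =====
-- Pre_ excludes dictionaries containing an empty word, on which Python A raises IndexError at word[0].
def Pre_set_paramaters (dictionary : List String) : Prop :=
  (dictionary.all (fun w => w ≠ "")) = true
instance (dictionary : List String) : Decidable (Pre_set_paramaters dictionary) := by
  unfold Pre_set_paramaters; infer_instance

def pvWitness_set_paramaters : List String := ["ab", "cd", "a", "cde"]

def Spec_set_paramaters (dictionary : List String) (out : List (String × Int)) : Prop := out = set_paramaters_alt dictionary
instance (dictionary : List String) (out : List (String × Int)) : Decidable (Spec_set_paramaters dictionary out) := by unfold Spec_set_paramaters; infer_instance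

-- ===== CLAIM (what is proved, stated in full; the proofs are below) =====
def Claim_equal_set_paramaters : Prop := ∀ (dictionary : List String), Dom_set_paramaters dictionary → Pre_set_paramaters dictionary → Spec_set_paramaters dictionary (set_paramaters dictionary)

-- ===== LEMMAS AND PROOFS =====

-- the reduction applied to each group
def pvRed : String × List Int → String × Int :=
  fun p => (p.1, (PySem.List.max? p.2 (fun y => y)).getD 0)

theorem pvRed_fst (p : String × List Int) : (pvRed p).1 = p.1 := rfl

theorem pvRed_single (k : String) (n : Int) : pvRed (k, [n]) = (k, n) := by
  simp [pvRed, PySem.List.max?_id_cons]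

theorem pvRed_append (k : String) (x : Int) (t : List Int) (n : Int) :
    pvRed (k, (x :: t) ++ [n]) = (k, max ((PySem.List.max? (x :: t) (fun y => y)).getD 0) n) := by
  simp [pvRed, PySem.List.max?_id_cons, List.foldl_append]

theorem pv_main (l : List String) (dA : PySem.Dict String Int) (dG : PySem.Dict String (List Int))
    (hnd : dG.keys.Nodup)
    (hit : dA.items = dG.items.map pvRed)
    (hne : ∀ p ∈ dG.items, p.2 ≠ []) :
    (l.foldl (fun parameters word =>
      if parameters.contains (pvFirst word) = false then
        parameters.insert (pvFirst word) (PySem.Str.len word)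
      else
        if PySem.Str.len word > parameters.getD (pvFirst word) 0 then
          parameters.insert (pvFirst word) (PySem.Str.len word)
        else parameters) dA).items
    = ((l.foldl (fun g word => g.modify (pvFirst word) [] (· ++ [PySem.Str.len word])) dG).items).map pvRed := by
  induction l generalizing dA dG with
  | nil => simpa using hit
  | cons w l ih =>
    have hkeys : dA.keys = dG.keys := by
      simp [PySem.Dict.keys, hit, Function.comp_def, pvRed_fst]
    have hndA : dA.keys.Nodup := hkeys ▸ hnd
    have hcont : dA.contains (pvFirst w) = dG.contains (pvFirst w) := by
      simp [PySem.Dict.contains, hit, List.any_map, Function.comp_def, pvRed_fst]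
    set k := pvFirst w with hk
    set n := PySem.Str.len w with hn
    by_cases hc : dG.contains k = true
    · -- key present in both dicts
      obtain ⟨ls, hls⟩ : ∃ ls, dG.get? k = some ls := by
        have := PySem.Dict.contains_eq_isSome_get? dG k
        rw [hc] at this
        exact Option.isSome_iff_exists.mp this.symm
      have hmemG : (k, ls) ∈ dG.items := PySem.Dict.mem_items_of_get?_eq_some dG hls
      have hlsne : ls ≠ [] := hne _ hmemG
      obtain ⟨x, t, rfl⟩ : ∃ x t, ls = x :: t := by
        cases ls with
        | nil => exact absurd rfl hlsne
        | cons x t => exact ⟨x, t, rfl⟩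
      have hgetG : dG.getD k [] = x :: t := PySem.Dict.getD_of_mem_items dG hmemG hnd []
      set M : Int := (PySem.List.max? (x :: t) (fun y => y)).getD 0 with hM
      have hmemA : (k, M) ∈ dA.items := by
        rw [hit]
        exact List.mem_map.mpr ⟨(k, x :: t), hmemG, rfl⟩
      have hgetA : dA.getD k 0 = M := PySem.Dict.getD_of_mem_items dA hmemA hndA 0
      have hcA : dA.contains k = true := hcont.trans hc
      -- B side
      have hGstep : (dG.modify k [] (· ++ [n])).items
          = dG.items.map (fun p => if p.1 == k then (k, (x :: t) ++ [n]) else p) := by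
        rw [PySem.Dict.modify, hgetG, PySem.Dict.items_insert_of_contains _ _ hc]
      have hmapB : ((dG.modify k [] (· ++ [n])).items).map pvRed
          = dA.items.map (fun q => if q.1 == k then (k, max M n) else q) := by
        rw [hGstep, hit, List.map_map, List.map_map]
        apply List.map_congr_left
        intro p hp
        by_cases hpk : p.1 = k
        · -- value at k is (x :: t) by uniqueness of keys
          have hp2 : p.2 = x :: t := by
            have hget : dG.get? p.1 = some p.2 :=
              (PySem.Dict.get?_eq_some_iff_mem_items dG p.1 p.2 hnd).mpr (by simpa using hp)
            rw [hpk, hls] at hget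
            exact (Option.some_inj.mp hget).symm
          simp only [Function.comp_apply, hpk, beq_self_eq_true, if_true, pvRed_fst]
          rw [hM]
          exact pvRed_append k x t n
        · simp [hpk, pvRed_fst]
      rw [List.foldl_cons, List.foldl_cons]
      by_cases hgt : n > M
      · have hmax : max M n = n := max_eq_right (le_of_lt hgt)
        rw [hmax] at hmapB
        apply ih
        · rw [PySem.Dict.modify]
          exact PySem.Dict.nodup_keys_insert _ _ _ hnd
        · simp only [← hk, ← hn, hcA, hgetA]
          rw [if_neg (by simp), if_pos hgt]
          rw [PySem.Dict.items_insert_of_contains _ _ hcA, hmapB]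
        · intro p hp
          rw [PySem.Dict.modify, hgetG] at hp
          rcases (PySem.Dict.mem_items_insert _ _ _ _).mp hp with h | h
          · simp [h]
          · exact hne _ h.1
      · have hmax : max M n = M := max_eq_left (by omega)
        rw [hmax] at hmapB
        apply ih
        · rw [PySem.Dict.modify]
          exact PySem.Dict.nodup_keys_insert _ _ _ hnd
        · simp only [← hk, ← hn, hcA, hgetA]
          rw [if_neg (by simp), if_neg hgt]
          rw [hmapB]
          conv_lhs => rw [← List.map_id dA.items]
          apply List.map_congr_left
          intro q hq
          by_cases hqk : q.1 = k
          · have hget : dA.get? q.1 = some q.2 :=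
              (PySem.Dict.get?_eq_some_iff_mem_items dA q.1 q.2 hndA).mpr (by simpa using hq)
            rw [hqk] at hget
            have hgetM : dA.get? k = some M :=
              (PySem.Dict.get?_eq_some_iff_mem_items dA k M hndA).mpr hmemA
            have : q.2 = M := by rw [hget] at hgetM; exact Option.some_inj.mp hgetM
            simp only [id_eq, hqk, beq_self_eq_true, if_true, ← this]
            rw [← hqk]
          · simp [hqk]
        · intro p hp
          rw [PySem.Dict.modify, hgetG] at hp
          rcases (PySem.Dict.mem_items_insert _ _ _ _).mp hp with h | h
          · simp [h]
          · exact hne _ h.1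
    · -- fresh key in both dicts
      have hc' : dG.contains k = false := by simpa using hc
      have hcA : dA.contains k = false := hcont.trans hc'
      have hgetG : dG.getD k [] = [] := PySem.Dict.getD_of_not_contains dG [] hc'
      rw [List.foldl_cons, List.foldl_cons]
      apply ih
      · rw [PySem.Dict.modify]
        exact PySem.Dict.nodup_keys_insert _ _ _ hnd
      · simp only [← hk, ← hn, hcA, if_true]
        rw [PySem.Dict.items_insert_of_not_contains _ _ hcA]
        rw [PySem.Dict.modify, hgetG]
        have hc'' : dG.contains k = false := hc'
        rw [PySem.Dict.items_insert_of_not_contains _ _ hc'']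
        simp [hit, pvRed_single]
      · intro p hp
        rw [PySem.Dict.modify, hgetG] at hp
        rw [PySem.Dict.items_insert_of_not_contains _ _ hc'] at hp
        rcases List.mem_append.mp hp with h | h
        · exact hne _ h
        · simp at h; simp [h]

-- ===== VERDICT (by name: the statement is the Claim_ definition above) =====
theorem set_paramaters_spec : Claim_equal_set_paramaters := by
  intro dictionary _ _
  unfold Spec_set_paramaters set_paramaters set_paramaters_alt
  exact pv_main dictionary PySem.Dict.empty PySem.Dict.empty (by simp [PySem.Dict.empty, PySem.Dict.keys])
    (by simp [PySem.Dict.empty]) (by simp [PySem.Dict.empty])
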